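-- pv_equiv track=rewrite | github.com/LuisMaerkens/Lokale-cloud_llm | cloud/src/utils.py | rank_relevant_lines
-- ===== SOURCE A (Python) =====
-- from typing import List
--
-- def rank_relevant_lines(lines: List[str], keywords: List[str]) -> List[str]:
--     def score_line(line: str) -> int:
--         score = 0
--         for keyword in keywords:
--             if keyword.lower() in line.lower():
--                 score += 1
--         return score
--
--     ranked = sorted(lines, key=score_line, reverse=True)
--     return ranked
-- ===== SOURCE B (Python) =====
-- def rank_relevant_lines(lines, keywords):
--     n = len(keywords)
--     kws = [kw.lower() for kw in keywords]
--     buckets = [[] for _ in range(n + 1)]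
--     for line in lines:
--         low = line.lower()
--         s = len([kw for kw in kws if kw in low])
--         buckets[s].append(line)
--     out = []
--     for bucket in reversed(buckets):
--         out.extend(bucket)
--     return out
-- ===== Notes on version B (the rewrite author's own statement) =====
-- stated objective: faster
-- what changed: Replaces the stable comparison sort (sorted with reverse=True, rescoring lines during comparison-key evaluation) by a one-pass stable counting/bucket sort over the score range 0..len(keywords), with keyword lowercasing hoisted out of the per-line loop; buckets are concatenated from highest score down.
import Mathlib
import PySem

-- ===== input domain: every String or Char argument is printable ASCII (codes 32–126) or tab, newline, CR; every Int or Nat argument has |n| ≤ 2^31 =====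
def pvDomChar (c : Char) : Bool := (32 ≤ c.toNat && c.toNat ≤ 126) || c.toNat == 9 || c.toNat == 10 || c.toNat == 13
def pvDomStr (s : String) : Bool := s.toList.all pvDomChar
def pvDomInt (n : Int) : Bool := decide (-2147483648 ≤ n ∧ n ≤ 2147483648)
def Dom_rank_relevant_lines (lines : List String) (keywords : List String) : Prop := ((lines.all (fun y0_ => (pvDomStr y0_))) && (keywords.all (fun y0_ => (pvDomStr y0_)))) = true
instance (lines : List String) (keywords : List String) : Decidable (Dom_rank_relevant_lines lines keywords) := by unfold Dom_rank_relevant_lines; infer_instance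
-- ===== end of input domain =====

-- B replaces the stable comparison sort by a stable counting/bucket sort over scores 0..len(keywords) (alternative decomposition, same result).

-- ===== PORT A =====
-- A's inner helper score_line: count keywords whose lowercase occurs in the line's lowercase
def pvScoreA (keywords : List String) (line : String) : Int :=
  keywords.foldl (fun score keyword =>
    if PySem.Str.isIn (PySem.Str.lower keyword) (PySem.Str.lower line) then score + 1 else score) 0

def rank_relevant_lines (lines : List String) (keywords : List String) : List String :=
  PySem.List.sorted lines (pvScoreA keywords) true

-- ===== PORT B =====
def rank_relevant_lines_alt (lines : List String) (keywords : List String) : List String :=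
  let n := keywords.length
  let kws := keywords.map PySem.Str.lower
  let buckets := lines.foldl (fun bs line =>
      let s := (kws.filter (fun kw => PySem.Str.isIn kw (PySem.Str.lower line))).length
      bs.set s (bs.getD s [] ++ [line]))
    (List.replicate (n + 1) ([] : List String))
  buckets.reverse.foldl (fun out bucket => out ++ bucket) []

-- ===== PRECONDITION & SPEC =====
def Spec_rank_relevant_lines (lines : List String) (keywords : List String) (out : List String) : Prop := out = rank_relevant_lines_alt lines keywords
instance (lines : List String) (keywords : List String) (out : List String) : Decidable (Spec_rank_relevant_lines lines keywords out) := by unfold Spec_rank_relevant_lines; infer_instance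

-- ===== CLAIM (what is proved, stated in full; the proofs are below) =====
def Claim_equal_rank_relevant_lines : Prop := ∀ (lines : List String) (keywords : List String), Dom_rank_relevant_lines lines keywords → Spec_rank_relevant_lines lines keywords (rank_relevant_lines lines keywords)

-- ===== LEMMAS AND PROOFS =====

-- B's score (a Nat count) and A's score (a fold accumulating an Int) agree
theorem pvScoreA_foldl (keywords : List String) (line : String) (a : Int) :
    keywords.foldl (fun score keyword =>
      if PySem.Str.isIn (PySem.Str.lower keyword) (PySem.Str.lower line) then score + 1 else score) a
    = a + (keywords.filter (fun kw => PySem.Str.isIn (PySem.Str.lower kw) (PySem.Str.lower line))).length := by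
  induction keywords generalizing a with
  | nil => simp
  | cons k t ih =>
    rw [List.foldl_cons, List.filter_cons]
    by_cases h : PySem.Str.isIn (PySem.Str.lower k) (PySem.Str.lower line) = true
    · rw [if_pos h, if_pos h, ih, List.length_cons]
      push_cast; ring
    · rw [if_neg h, if_neg h, ih]

theorem pvScoreB_eq (keywords : List String) (line : String) :
    pvScoreA keywords line
    = (((keywords.map PySem.Str.lower).filter (fun kw => PySem.Str.isIn kw (PySem.Str.lower line))).length : Int) := by
  unfold pvScoreA
  rw [pvScoreA_foldl, List.filter_map, List.length_map, zero_add]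
  congr 2

-- descending buckets: filter score = n, then score = n-1, …, then score = 0
def pvBucketsDesc {α : Type} (key : α → Int) (xs : List α) : Nat → List α
  | 0 => xs.filter (fun x => key x == ((0 : Nat) : Int))
  | n + 1 => xs.filter (fun x => key x == ((n + 1 : Nat) : Int)) ++ pvBucketsDesc key xs n

theorem insertBy_of_forall_before {α : Type} (before : α → α → Bool) (x : α) (ys : List α)
    (h : ∀ y ∈ ys, before x y = true) : PySem.List.insertBy before x ys = x :: ys := by
  cases ys with
  | nil => rfl
  | cons y t => simp [PySem.List.insertBy, h y (by simp)]

theorem insertBy_append_of_forall_not {α : Type} (before : α → α → Bool) (x : α) (l1 l2 : List α)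
    (h : ∀ y ∈ l1, before x y = false) :
    PySem.List.insertBy before x (l1 ++ l2) = l1 ++ PySem.List.insertBy before x l2 := by
  induction l1 with
  | nil => rfl
  | cons y t ih =>
    simp only [List.cons_append, PySem.List.insertBy, h y (by simp)]
    simp [ih (fun z hz => h z (by simp [hz]))]

theorem mem_pvBucketsDesc {α : Type} (key : α → Int) (xs : List α) (n : Nat) (y : α)
    (hy : y ∈ pvBucketsDesc key xs n) : y ∈ xs ∧ 0 ≤ key y ∧ key y ≤ n := by
  induction n with
  | zero =>
    simp only [pvBucketsDesc, List.mem_filter] at hy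
    refine ⟨hy.1, ?_, ?_⟩ <;> simp_all
  | succ m ih =>
    simp only [pvBucketsDesc, List.mem_append] at hy
    rcases hy with h | h
    · simp only [List.mem_filter, beq_iff_eq] at h
      refine ⟨h.1, by omega, by omega⟩
    · have := ih h
      refine ⟨this.1, this.2.1, by push_cast; omega⟩

theorem insertBy_pvBucketsDesc {α : Type} (key : α → Int) (xs : List α) (x : α) (n : Nat)
    (h0 : 0 ≤ key x) (hn : key x ≤ n) :
    PySem.List.insertBy (fun a b => decide (key b < key a)) x (pvBucketsDesc key xs n)
    = pvBucketsDesc key (xs ++ [x]) n := by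
  induction n with
  | zero =>
    have hx0 : key x = 0 := le_antisymm (by exact_mod_cast hn) h0
    rw [pvBucketsDesc, PySem.List.insertBy_of_forall_not_before _ _ _
      (fun y hy => by
        simp only [List.mem_filter, beq_iff_eq] at hy
        simp [hy.2, hx0])]
    simp only [pvBucketsDesc, List.filter_append, List.filter_cons, List.filter_nil]
    simp [hx0]
  | succ m ih =>
    by_cases hx : key x = ((m + 1 : Nat) : Int)
    · rw [pvBucketsDesc, insertBy_append_of_forall_not _ _ _ _
        (fun y hy => by simp only [List.mem_filter, beq_iff_eq] at hy; simp [hy.2, hx]),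
        insertBy_of_forall_before _ _ _
        (fun y hy => by
          have := mem_pvBucketsDesc key xs m y hy
          simp only [decide_eq_true_eq]
          omega)]
      have hfx : ∀ (l : List α) (s : Nat), s ≠ m + 1 →
          (l ++ [x]).filter (fun z => key z == ((s : Nat) : Int)) = l.filter (fun z => key z == ((s : Nat) : Int)) := by
        intro l s hs
        rw [List.filter_append]
        simp only [List.filter_cons, List.filter_nil]
        have : ¬ (key x == ((s : Nat) : Int)) = true := by
          simp only [beq_iff_eq]; intro hc; rw [hx] at hc
          have : (m + 1 : Nat) = s := by exact_mod_cast hc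
          omega
        simp [this]
      have hsame : ∀ k : Nat, k ≤ m → pvBucketsDesc key (xs ++ [x]) k = pvBucketsDesc key xs k := by
        intro k hk
        induction k with
        | zero => simp only [pvBucketsDesc]; rw [hfx xs 0 (by omega)]
        | succ j ihj =>
          simp only [pvBucketsDesc]
          rw [hfx xs (j+1) (by omega), ihj (by omega)]
      simp only [pvBucketsDesc]
      rw [hsame m (by omega), List.filter_append]
      simp only [List.filter_cons, List.filter_nil]
      push_cast at hx
      simp [hx]
    · have hxm : key x ≤ m := by push_cast at hn hx ⊢; omega
      rw [pvBucketsDesc, insertBy_append_of_forall_not _ _ _ _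
        (fun y hy => by
          simp only [List.mem_filter, beq_iff_eq] at hy
          simp only [decide_eq_false_iff_not, not_lt]
          rw [hy.2]; push_cast; omega),
        ih hxm]
      simp only [pvBucketsDesc]
      rw [List.filter_append]
      simp only [List.filter_cons, List.filter_nil]
      push_cast at hx
      simp [hx]

theorem sorted_rev_eq_pvBucketsDesc {α : Type} (key : α → Int) (xs : List α) (n : Nat)
    (h : ∀ x ∈ xs, 0 ≤ key x ∧ key x ≤ n) :
    PySem.List.sorted xs key true = pvBucketsDesc key xs n := by
  rw [PySem.List.sorted_rev_eq_foldl_insertBy]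
  induction xs using List.reverseRecOn with
  | nil =>
    simp only [List.foldl_nil]
    induction n with
    | zero => rw [pvBucketsDesc, List.filter_nil]
    | succ m ihm => rw [pvBucketsDesc, List.filter_nil, List.nil_append]; exact ihm (by simp)
  | append_singleton t x ih =>
    rw [List.foldl_append, List.foldl_cons, List.foldl_nil,
      ih (fun y hy => h y (by simp [hy]))]
    exact insertBy_pvBucketsDesc key t x n (h x (by simp)).1 (h x (by simp)).2

-- B-side score, as a Nat
def pvScoreN (keywords : List String) (line : String) : Nat :=
  ((keywords.map PySem.Str.lower).filter (fun kw => PySem.Str.isIn kw (PySem.Str.lower line))).length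

theorem pvScoreN_le (keywords : List String) (line : String) :
    pvScoreN keywords line ≤ keywords.length := by
  unfold pvScoreN
  calc _ ≤ (keywords.map PySem.Str.lower).length := List.length_filter_le _ _
    _ = keywords.length := List.length_map ..

-- the bucket-filling loop builds, for each score s, the filter of the lines processed so far
theorem foldl_buckets (keywords : List String) (xs p : List String) :
    xs.foldl (fun bs line =>
        bs.set (pvScoreN keywords line) (bs.getD (pvScoreN keywords line) [] ++ [line]))
      ((List.range (keywords.length + 1)).map (fun s => p.filter (fun l => pvScoreN keywords l == s)))
    = (List.range (keywords.length + 1)).map (fun s => (p ++ xs).filter (fun l => pvScoreN keywords l == s)) := by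
  induction xs generalizing p with
  | nil => simp
  | cons x t ih =>
    rw [List.foldl_cons]
    have hlt : pvScoreN keywords x < keywords.length + 1 :=
      Nat.lt_succ_of_le (pvScoreN_le keywords x)
    have hstep : ((List.range (keywords.length + 1)).map (fun s => p.filter (fun l => pvScoreN keywords l == s))).set
          (pvScoreN keywords x)
          (((List.range (keywords.length + 1)).map (fun s => p.filter (fun l => pvScoreN keywords l == s))).getD (pvScoreN keywords x) [] ++ [x])
        = (List.range (keywords.length + 1)).map (fun s => (p ++ [x]).filter (fun l => pvScoreN keywords l == s)) := by
      have hlen : ((List.range (keywords.length + 1)).map (fun s => p.filter (fun l => pvScoreN keywords l == s))).length = keywords.length + 1 := by simp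
      have hgetD : ((List.range (keywords.length + 1)).map (fun s => p.filter (fun l => pvScoreN keywords l == s))).getD (pvScoreN keywords x) []
          = p.filter (fun l => pvScoreN keywords l == pvScoreN keywords x) := by
        rw [List.getD_eq_getElem _ _ (by simpa using hlt)]
        simp
      rw [hgetD]
      apply List.ext_getElem
      · simp
      · intro i hi1 hi2
        simp only [List.length_set, hlen] at hi1
        rw [List.getElem_set]
        simp only [List.getElem_map, List.getElem_range, List.filter_append,
          List.filter_cons, List.filter_nil]
        split
        · next heq =>
          subst heq
          simp
        · next hne =>
          have : ¬ (pvScoreN keywords x == i) = true := by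
            simp only [beq_iff_eq]; omega
          simp [this]
    rw [hstep, ih (p ++ [x])]
    simp

theorem foldl_extend {α : Type} (l : List (List α)) (a : List α) :
    l.foldl (fun out bucket => out ++ bucket) a = a ++ l.flatten := by
  induction l generalizing a with
  | nil => simp
  | cons b t ih => simp [ih, List.append_assoc]

theorem pvBucketsDesc_eq_flatten {α : Type} (key : α → Int) (xs : List α) (n : Nat) :
    pvBucketsDesc key xs n
    = (((List.range (n + 1)).map (fun s => xs.filter (fun x => key x == ((s : Nat) : Int)))).reverse).flatten := by
  induction n with
  | zero => simp [pvBucketsDesc, List.range_succ]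
  | succ m ih =>
    rw [pvBucketsDesc, ih]
    conv_rhs => rw [List.range_succ]
    simp

-- ===== VERDICT (by name: the statement is the Claim_ definition above) =====
theorem rank_relevant_lines_spec : Claim_equal_rank_relevant_lines := by
  intro lines keywords _
  unfold Spec_rank_relevant_lines rank_relevant_lines rank_relevant_lines_alt
  simp only []
  have hkey : ∀ l, pvScoreA keywords l = ((pvScoreN keywords l : Nat) : Int) := fun l =>
    pvScoreB_eq keywords l
  have hbound : ∀ l ∈ lines, 0 ≤ pvScoreA keywords l ∧ pvScoreA keywords l ≤ (keywords.length : Nat) := by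
    intro l _
    rw [hkey l]
    constructor
    · positivity
    · exact_mod_cast pvScoreN_le keywords l
  rw [sorted_rev_eq_pvBucketsDesc (pvScoreA keywords) lines keywords.length hbound,
    pvBucketsDesc_eq_flatten]
  have hinit : (List.replicate (keywords.length + 1) ([] : List String))
      = (List.range (keywords.length + 1)).map (fun s => ([] : List String).filter (fun l => pvScoreN keywords l == s)) := by
    simp [List.map_const']
  have hfb := foldl_buckets keywords lines []
  simp only [pvScoreN] at hfb hinit
  rw [hinit, hfb, List.nil_append, foldl_extend, List.nil_append]
  congr 1
  congr 1
  apply List.map_congr_left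
  intro s _
  apply List.filter_congr
  intro l _
  rw [hkey l]
  simp [pvScoreN]
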